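-- pv_equiv track=rewrite | github.com/lhju4e/TIL | algo/1211_2.py | solution
-- ===== SOURCE A (Python) =====
-- def solution(ip_address, langs, scores):
--     answer = len(ip_address)
--     dic = dict()
--     for i in range(len(ip_address)):
--         if ip_address[i] not in dic:
--             dic[ip_address[i]] = [i]
--         else:
--             dic[ip_address[i]].append(i)
--
--     for i in range(len(langs)):
--         if langs[i] in ["C", "C++", "C#"]:
--             langs[i] = "C" #같은군집 그냥 같은 언어로 치환
--
--     for ip, value_list in dic.items():
--         if len(value_list) >= 4:
--             answer -= len(value_list)
--         elif len(value_list) == 3: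
--             if (langs[value_list[0]] == langs[value_list[1]]) and (langs[value_list[1]] == langs[value_list[2]]):
--                 answer -= 3
--         elif len(value_list) == 2:
--             if langs[value_list[0]] == langs[value_list[1]] and scores[value_list[0]] == scores[value_list[1]]:
--                 answer -= 2
--
--     return answer
-- ===== SOURCE B (Python) =====
-- def solution(ip_address, langs, scores):
--     # same in-place normalization of the C family as the original
--     for i in range(len(langs)):
--         if langs[i] in ("C", "C++", "C#"):
--             langs[i] = "C"
--     n = len(ip_address)
--     ans = n
--     seen = set()
--     for i in range(n):
--         ip = ip_address[i]
--         if ip in seen: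
--             continue
--         seen.add(ip)
--         grp = [j for j in range(n) if ip_address[j] == ip]
--         k = len(grp)
--         if k >= 4:
--             ans -= k
--         elif k == 3:
--             if langs[grp[0]] == langs[grp[1]] and langs[grp[1]] == langs[grp[2]]:
--                 ans -= 3
--         elif k == 2:
--             if langs[grp[0]] == langs[grp[1]] and scores[grp[0]] == scores[grp[1]]:
--                 ans -= 2
--     return ans
-- ===== Notes on version B (the rewrite author's own statement) =====
-- stated objective: alternative
-- what changed: Replaces A's dict-of-index-lists grouping and final dict-items pass by a single seen-set scan over the array that, at each first occurrence of an IP, regroups its indices with an index-filter comprehension and applies the tier rule immediately (no dict at all); the in-place C-family normalization of langs and the short-circuiting tier comparisons are kept identical.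
import Mathlib
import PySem

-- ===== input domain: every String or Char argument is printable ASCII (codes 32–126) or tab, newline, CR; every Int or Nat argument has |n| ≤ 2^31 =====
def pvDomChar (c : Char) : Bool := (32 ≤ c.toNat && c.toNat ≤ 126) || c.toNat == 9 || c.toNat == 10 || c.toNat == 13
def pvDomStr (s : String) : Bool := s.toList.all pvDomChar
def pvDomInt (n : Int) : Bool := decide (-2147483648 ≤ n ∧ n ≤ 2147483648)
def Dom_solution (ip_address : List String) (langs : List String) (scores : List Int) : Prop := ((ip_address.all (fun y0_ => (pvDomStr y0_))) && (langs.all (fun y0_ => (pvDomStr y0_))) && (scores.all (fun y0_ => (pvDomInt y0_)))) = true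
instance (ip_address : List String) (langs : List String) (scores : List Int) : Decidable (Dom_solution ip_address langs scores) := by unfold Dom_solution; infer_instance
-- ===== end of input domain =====

-- B replaces A's dict-of-index-lists grouping by a single seen-set scan that regroups
-- equal IPs with an index filter per distinct IP (alternative decomposition, no dict);
-- both Pythons mutate `langs` in place identically, the equivalence is about the return value.

-- shared indexing shorthands (Python xs[i], in-range under Pre_solution)
def pvGetS (xs : List String) (i : Int) : String := (PySem.List.pyGet? xs i).getD ""
def pvGetI (xs : List Int) (i : Int) : Int := (PySem.List.pyGet? xs i).getD 0

-- ===== PORT A =====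
def solution (ip_address : List String) (langs : List String) (scores : List Int) : Int :=
  let answer : Int := ip_address.length
  let dic : PySem.Dict String (List Int) :=
    (PySem.List.enumerate ip_address 0).foldl
      (fun d p =>
        if d.contains p.2 = false then d.insert p.2 [p.1]
        else d.insert p.2 (d.getD p.2 [] ++ [p.1]))
      PySem.Dict.empty
  let langs2 := langs.map (fun l => if l = "C" ∨ l = "C++" ∨ l = "C#" then "C" else l)
  dic.items.foldl
    (fun ans kv =>
      if 4 ≤ kv.2.length then ans - (kv.2.length : Int)
      else if kv.2.length = 3 then
        (if pvGetS langs2 (pvGetI kv.2 0) = pvGetS langs2 (pvGetI kv.2 1)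
            ∧ pvGetS langs2 (pvGetI kv.2 1) = pvGetS langs2 (pvGetI kv.2 2)
         then ans - 3 else ans)
      else if kv.2.length = 2 then
        (if pvGetS langs2 (pvGetI kv.2 0) = pvGetS langs2 (pvGetI kv.2 1)
            ∧ pvGetI scores (pvGetI kv.2 0) = pvGetI scores (pvGetI kv.2 1)
         then ans - 2 else ans)
      else ans)
    answer

-- ===== PORT B =====
-- grp = [j for j in range(n) if ip_address[j] == ip]
def pvGrpB (ip_address : List String) (ip : String) : List Int :=
  (PySem.List.enumerate ip_address 0).foldl
    (fun acc q => if q.2 == ip then acc ++ [q.1] else acc) []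

-- one iteration of B's seen-set scan, state = (seen, ans)
def pvStepB (ip_address : List String) (langs2 : List String) (scores : List Int)
    (st : PySem.Set String × Int) (p : Int × String) : PySem.Set String × Int :=
  if PySem.Set.contains st.1 p.2 then st
  else
    (PySem.Set.add st.1 p.2,
     let grp := pvGrpB ip_address p.2
     let k := grp.length
     if 4 ≤ k then st.2 - (k : Int)
     else if k = 3 then
       (if pvGetS langs2 (pvGetI grp 0) = pvGetS langs2 (pvGetI grp 1)
           ∧ pvGetS langs2 (pvGetI grp 1) = pvGetS langs2 (pvGetI grp 2)
        then st.2 - 3 else st.2)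
     else if k = 2 then
       (if pvGetS langs2 (pvGetI grp 0) = pvGetS langs2 (pvGetI grp 1)
           ∧ pvGetI scores (pvGetI grp 0) = pvGetI scores (pvGetI grp 1)
        then st.2 - 2 else st.2)
     else st.2)

def solution_alt (ip_address : List String) (langs : List String) (scores : List Int) : Int :=
  let langs2 := langs.map (fun l => if l = "C" ∨ l = "C++" ∨ l = "C#" then "C" else l)
  ((PySem.List.enumerate ip_address 0).foldl (pvStepB ip_address langs2 scores)
      (PySem.Set.empty, (ip_address.length : Int))).2

-- ===== PRECONDITION & SPEC =====
-- the lang at index j after A's in-place C-family normalization (used only by Pre_)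
def pvNormL (langs : List String) (j : Nat) : String :=
  (langs.map (fun l => if l = "C" ∨ l = "C++" ∨ l = "C#" then "C" else l)).getD j ""
-- the ascending indices holding value v (used only by Pre_)
def pvGrpN (ip_address : List String) (v : String) : List Nat :=
  (List.range ip_address.length).filter (fun j => ip_address.getD j "" = v)
-- Pre_ excludes exactly the inputs on which A raises IndexError: a duplicate group of size 2
-- or 3 whose indexing of langs (or, for size 2 with equal normalized langs, of scores) is out
-- of range at an index A's short-circuiting `and` actually reaches; B raises there too.
def Pre_solution (ip_address : List String) (langs : List String) (scores : List Int) : Prop :=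
  ∀ v ∈ ip_address,
    ((pvGrpN ip_address v).length = 3 →
      (pvGrpN ip_address v).getD 1 0 < langs.length ∧
      (pvNormL langs ((pvGrpN ip_address v).getD 0 0)
         = pvNormL langs ((pvGrpN ip_address v).getD 1 0) →
       (pvGrpN ip_address v).getD 2 0 < langs.length)) ∧
    ((pvGrpN ip_address v).length = 2 →
      (pvGrpN ip_address v).getD 1 0 < langs.length ∧
      (pvNormL langs ((pvGrpN ip_address v).getD 0 0)
         = pvNormL langs ((pvGrpN ip_address v).getD 1 0) →
       (pvGrpN ip_address v).getD 1 0 < scores.length))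
instance (ip_address : List String) (langs : List String) (scores : List Int) : Decidable (Pre_solution ip_address langs scores) := by unfold Pre_solution; infer_instance
def pvWitness_solution : List String × List String × List Int :=
  (["a", "b", "a"], ["C", "C++", "Java"], [1, 2, 1])
def Spec_solution (ip_address : List String) (langs : List String) (scores : List Int) (out : Int) : Prop := out = solution_alt ip_address langs scores
instance (ip_address : List String) (langs : List String) (scores : List Int) (out : Int) : Decidable (Spec_solution ip_address langs scores out) := by unfold Spec_solution; infer_instance

-- ===== CLAIM (what is proved, stated in full; the proofs are below) =====
def Claim_equal_solution : Prop := ∀ (ip_address : List String) (langs : List String) (scores : List Int), Dom_solution ip_address langs scores → Pre_solution ip_address langs scores → Spec_solution ip_address langs scores (solution ip_address langs scores)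

-- ===== LEMMAS AND PROOFS =====

-- the group of (Python-int) indices holding value v
def pvGrp (ip_address : List String) (v : String) : List Int :=
  ((PySem.List.enumerate ip_address 0).filter (fun p => p.2 == v)).map (·.1)

-- the tiered penalty a group contributes (mirrors A's branches)
def pvPen (langs2 : List String) (scores : List Int) (vl : List Int) : Int :=
  if 4 ≤ vl.length then (vl.length : Int)
  else if vl.length = 3 then
    (if pvGetS langs2 (pvGetI vl 0) = pvGetS langs2 (pvGetI vl 1)
        ∧ pvGetS langs2 (pvGetI vl 1) = pvGetS langs2 (pvGetI vl 2) then 3 else 0)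
  else if vl.length = 2 then
    (if pvGetS langs2 (pvGetI vl 0) = pvGetS langs2 (pvGetI vl 1)
        ∧ pvGetI scores (pvGetI vl 0) = pvGetI scores (pvGetI vl 1) then 2 else 0)
  else 0

-- A's per-item update step subtracts the penalty
lemma pv_stepA_eq (langs2 : List String) (scores : List Int) (ans : Int) (kv : String × List Int) :
    (if 4 ≤ kv.2.length then ans - (kv.2.length : Int)
     else if kv.2.length = 3 then
       (if pvGetS langs2 (pvGetI kv.2 0) = pvGetS langs2 (pvGetI kv.2 1)
           ∧ pvGetS langs2 (pvGetI kv.2 1) = pvGetS langs2 (pvGetI kv.2 2)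
        then ans - 3 else ans)
     else if kv.2.length = 2 then
       (if pvGetS langs2 (pvGetI kv.2 0) = pvGetS langs2 (pvGetI kv.2 1)
           ∧ pvGetI scores (pvGetI kv.2 0) = pvGetI scores (pvGetI kv.2 1)
        then ans - 2 else ans)
     else ans)
      = ans - pvPen langs2 scores kv.2 := by
  simp only [pvPen]; split_ifs <;> ring

-- the distinct values B's scan meets for the first time, in order
def pvNews (s : PySem.Set String) : List (Int × String) → List String
  | [] => []
  | p :: t =>
      if PySem.Set.contains s p.2 then pvNews s t
      else p.2 :: pvNews (PySem.Set.add s p.2) t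

lemma pv_foldl_sub {α : Type} (l : List α) (f : α → Int) (a : Int) :
    l.foldl (fun a x => a - f x) a = a - (l.map f).sum := by
  induction l generalizing a with
  | nil => simp
  | cons x t ih => simp [ih]; ring

-- A's dict-building step is a `modify`
lemma pv_bstep_eq (d : PySem.Dict String (List Int)) (p : Int × String) :
    (if d.contains p.2 = false then d.insert p.2 [p.1]
     else d.insert p.2 (d.getD p.2 [] ++ [p.1]))
      = d.modify p.2 [] (· ++ [p.1]) := by
  by_cases h : d.contains p.2 = true
  · simp [PySem.Dict.modify, h]
  · simp only [Bool.not_eq_true] at h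
    simp [PySem.Dict.modify, h, PySem.Dict.getD_of_not_contains]

-- characterisation of A's dict
lemma pv_dic_spec (ip_address : List String) :
    ((PySem.List.enumerate ip_address 0).foldl
      (fun d p =>
        if d.contains p.2 = false then d.insert p.2 [p.1]
        else d.insert p.2 (d.getD p.2 [] ++ [p.1]))
      PySem.Dict.empty).items
      = (PySem.Set.ofList ip_address).map (fun v => (v, pvGrp ip_address v)) := by
  have hstep : (PySem.List.enumerate ip_address 0).foldl
      (fun d p =>
        if d.contains p.2 = false then d.insert p.2 [p.1]
        else d.insert p.2 (d.getD p.2 [] ++ [p.1]))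
      PySem.Dict.empty
      = (PySem.List.enumerate ip_address 0).foldl
          (fun d p => d.modify p.2 [] (· ++ [p.1])) PySem.Dict.empty :=
    PySem.List.foldl_congr_mem _ _ _ _ (fun d p _ => pv_bstep_eq d p)
  rw [hstep]
  have hkeys : ((PySem.List.enumerate ip_address 0).foldl
      (fun d p => d.modify p.2 [] (· ++ [p.1])) PySem.Dict.empty).keys
      = PySem.Set.ofList ip_address := by
    rw [PySem.Dict.keys_foldl_modify_key (PySem.List.enumerate ip_address 0)
      (fun p => p.2) [] (fun _ p => (· ++ [p.1])) PySem.Dict.empty]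
    simp [PySem.List.map_snd_enumerate, PySem.Set.ofList_eq_foldl, PySem.Set.update]
  have hnodup : ((PySem.List.enumerate ip_address 0).foldl
      (fun d p => d.modify p.2 [] (· ++ [p.1])) PySem.Dict.empty).keys.Nodup := by
    exact PySem.Dict.nodup_keys_foldl_modify_key (PySem.List.enumerate ip_address 0)
      (fun p => p.2) [] (fun _ p => (· ++ [p.1])) PySem.Dict.empty (by simp)
  have hgetD : ∀ v, ((PySem.List.enumerate ip_address 0).foldl
      (fun d p => d.modify p.2 [] (· ++ [p.1])) PySem.Dict.empty).getD v []
      = pvGrp ip_address v := by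
    intro v
    have hmap : (PySem.List.enumerate ip_address 0).foldl
        (fun d p => d.modify p.2 [] (· ++ [p.1])) PySem.Dict.empty
        = ((PySem.List.enumerate ip_address 0).map (fun p => (p.2, p.1))).foldl
            (fun d q => d.modify q.1 [] (· ++ [q.2])) PySem.Dict.empty := by
      rw [List.foldl_map]
    rw [hmap, PySem.Dict.getD_foldl_modify_append]
    simp [pvGrp, List.filter_map, List.map_map, Function.comp_def]
  rw [PySem.Dict.items_eq_map_keys _ hnodup []]
  rw [hkeys]
  exact List.map_congr_left (fun v _ => by rw [hgetD v])

-- B's comprehension is the filtered index list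
lemma pv_grpB_eq (ip_address : List String) (v : String) :
    pvGrpB ip_address v = pvGrp ip_address v := by
  simpa [pvGrpB, pvGrp] using
    PySem.List.foldl_append_if (fun q : Int × String => q.2 == v) (fun q : Int × String => q.1)
      (PySem.List.enumerate ip_address 0) []

lemma pv_stepB_eq (ip_address : List String) (langs2 : List String) (scores : List Int)
    (st : PySem.Set String × Int) (p : Int × String) :
    pvStepB ip_address langs2 scores st p
      = if PySem.Set.contains st.1 p.2 then st
        else (PySem.Set.add st.1 p.2, st.2 - pvPen langs2 scores (pvGrp ip_address p.2)) := by
  by_cases h : PySem.Set.contains st.1 p.2 = true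
  · unfold pvStepB; rw [if_pos h, if_pos h]
  · unfold pvStepB
    rw [if_neg h, if_neg h]
    refine congrArg (Prod.mk _) ?_
    simp only [pv_grpB_eq, pvPen]
    split_ifs <;> ring

lemma pv_update_prefix {l : List String} {s : PySem.Set String} :
    ∃ r, PySem.Set.update s l = s ++ r := by
  induction l generalizing s with
  | nil => exact ⟨[], by simp [PySem.Set.update]⟩
  | cons x t ih =>
      by_cases h : x ∈ s
      · obtain ⟨r, hr⟩ := ih (s := s)
        exact ⟨r, by simpa [PySem.Set.update, PySem.Set.add, h] using hr⟩
      · obtain ⟨r, hr⟩ := ih (s := s ++ [x])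
        exact ⟨x :: r, by simpa [PySem.Set.update, PySem.Set.add, h] using hr⟩

lemma pv_news_eq (l : List (Int × String)) (s : PySem.Set String) :
    pvNews s l = (PySem.Set.update s (l.map (·.2))).drop s.length := by
  induction l generalizing s with
  | nil => simp [pvNews, PySem.Set.update]
  | cons p t ih =>
      rw [List.map_cons, PySem.Set.update_cons]
      by_cases h : p.2 ∈ s
      · have hcon : PySem.Set.contains s p.2 = true := by simp [PySem.Set.contains, h]
        have hadd : PySem.Set.add s p.2 = s := by simp [PySem.Set.add, h]
        simp only [pvNews]
        rw [if_pos hcon, hadd, ih]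
      · have hcon : PySem.Set.contains s p.2 = false := by simp [PySem.Set.contains, h]
        have hadd : PySem.Set.add s p.2 = s ++ [p.2] := by simp [PySem.Set.add, h]
        obtain ⟨r, hr⟩ := pv_update_prefix (l := t.map (·.2)) (s := s ++ [p.2])
        simp only [pvNews]
        rw [if_neg (by simp [h]), ih, hadd, hr]
        rw [List.drop_left, List.append_assoc, List.drop_left]
        simp

lemma pv_fold_inv (ip_address : List String) (langs2 : List String) (scores : List Int)
    (l : List (Int × String)) (s : PySem.Set String) (a : Int) :
    l.foldl (pvStepB ip_address langs2 scores) (s, a)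
      = (PySem.Set.update s (l.map (·.2)),
         a - ((pvNews s l).map (fun v => pvPen langs2 scores (pvGrp ip_address v))).sum) := by
  induction l generalizing s a with
  | nil => simp [pvNews, PySem.Set.update]
  | cons p t ih =>
      rw [List.foldl_cons, pv_stepB_eq, List.map_cons, PySem.Set.update_cons]
      by_cases h : PySem.Set.contains s p.2 = true
      · have hm : p.2 ∈ s := by simpa [PySem.Set.contains] using h
        have hadd : PySem.Set.add s p.2 = s := by simp [PySem.Set.add, hm]
        rw [if_pos h, ih, hadd]
        simp only [pvNews]
        rw [if_pos h]
      · rw [if_neg h, ih]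
        simp only [pvNews]
        rw [if_neg h]
        simp only [List.map_cons, List.sum_cons]
        exact congrArg (Prod.mk _) (by ring)

-- assembled characterisations of the two ports
lemma pv_A_eq (ip_address : List String) (langs : List String) (scores : List Int) :
    solution ip_address langs scores
      = (ip_address.length : Int)
        - ((PySem.Set.ofList ip_address).map
            (fun v => pvPen (langs.map (fun l => if l = "C" ∨ l = "C++" ∨ l = "C#" then "C" else l))
              scores (pvGrp ip_address v))).sum := by
  simp only [solution]
  rw [pv_dic_spec, List.foldl_map]
  rw [← pv_foldl_sub (PySem.Set.ofList ip_address)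
      (fun v => pvPen (langs.map (fun l => if l = "C" ∨ l = "C++" ∨ l = "C#" then "C" else l))
        scores (pvGrp ip_address v)) (ip_address.length : Int)]
  exact PySem.List.foldl_congr_mem _ _ _ _
    (fun a v _ => pv_stepA_eq _ _ a (v, pvGrp ip_address v))

lemma pv_B_eq (ip_address : List String) (langs : List String) (scores : List Int) :
    solution_alt ip_address langs scores
      = (ip_address.length : Int)
        - ((PySem.Set.ofList ip_address).map
            (fun v => pvPen (langs.map (fun l => if l = "C" ∨ l = "C++" ∨ l = "C#" then "C" else l))
              scores (pvGrp ip_address v))).sum := by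
  simp only [solution_alt]
  rw [pv_fold_inv]
  have hnews : pvNews PySem.Set.empty (PySem.List.enumerate ip_address 0)
      = PySem.Set.ofList ip_address := by
    rw [pv_news_eq]
    simp [PySem.Set.empty, PySem.Set.update, PySem.List.map_snd_enumerate,
      PySem.Set.ofList_eq_foldl]
  rw [hnews]

-- ===== VERDICT (by name: the statement is the Claim_ definition above) =====
theorem solution_spec : Claim_equal_solution := by
  intro ip_address langs scores _ _
  unfold Spec_solution
  rw [pv_A_eq, pv_B_eq]
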